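-- pv_equiv track=rewrite | github.com/jaywyawhare/PuchAI-Hiring-Challenge | src/services/researchers_wet_dream_service.py | _identify_loopholes
-- ===== SOURCE A (Python) =====
-- from typing import Dict, Any, Optional, List, Set
--
-- def _identify_loopholes(citations: List[Dict[str, Any]], session_data: Dict[str, Any]) -> List[str]:
--     """Identify loopholes and weaknesses in the research."""
--     loopholes = []
--
--     # Check for logical gaps
--     if len(citations) < 3:
--         loopholes.append("Insufficient evidence base - conclusions may not be well-supported")
--
--     # Check for alternative explanations
--     abstracts = [c.get('abstract', '') for c in citations]
--     alternative_terms = ['however', 'but', 'although', 'despite', 'nevertheless', 'alternative']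
--     has_alternatives = any(
--         any(term in abstract.lower() for term in alternative_terms)
--         for abstract in abstracts
--     )
--
--     if not has_alternatives:
--         loopholes.append("Limited consideration of alternative explanations or counterarguments")
--
--     # Check for bias indicators
--     sources = [c.get('source', '') for c in citations]
--     if len(set(sources)) == 1:
--         loopholes.append("Single-source bias - all research from same database may introduce bias")
--
--     # Check for missing context
--     if not any('context' in c.get('abstract', '').lower() or 'background' in c.get('abstract', '').lower()
--               for c in citations):
--         loopholes.append("Missing contextual information - research may lack proper background context")
--
--     # Check for methodological weaknesses
--     if not any('method' in c.get('abstract', '').lower() or 'methodology' in c.get('abstract', '').lower()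
--               for c in citations):
--         loopholes.append("Limited methodological discussion - research approaches may not be well-justified")
--
--     # Check for validation gaps
--     if not any('validate' in c.get('abstract', '').lower() or 'verify' in c.get('abstract', '').lower()
--               for c in citations):
--         loopholes.append("Missing validation approaches - findings may lack proper verification")
--
--     return loopholes
-- ===== SOURCE B (Python) =====
-- def _identify_loopholes(citations, session_data):
--     """Single pass over citations building flags + a source set, then one reporting phase."""
--     ALT_TERMS = ('however', 'but', 'although', 'despite', 'nevertheless', 'alternative')
--     has_alt = has_ctx = has_meth = has_val = False
--     sources = set()
--     for c in citations:
--         a = c.get('abstract', '').lower()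
--         has_alt = has_alt or any(t in a for t in ALT_TERMS)
--         has_ctx = has_ctx or 'context' in a or 'background' in a
--         has_meth = has_meth or 'method' in a or 'methodology' in a
--         has_val = has_val or 'validate' in a or 'verify' in a
--         sources.add(c.get('source', ''))
--     loopholes = []
--     if len(citations) < 3:
--         loopholes.append("Insufficient evidence base - conclusions may not be well-supported")
--     if not has_alt:
--         loopholes.append("Limited consideration of alternative explanations or counterarguments")
--     if len(sources) == 1:
--         loopholes.append("Single-source bias - all research from same database may introduce bias")
--     if not has_ctx:
--         loopholes.append("Missing contextual information - research may lack proper background context")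
--     if not has_meth:
--         loopholes.append("Limited methodological discussion - research approaches may not be well-justified")
--     if not has_val:
--         loopholes.append("Missing validation approaches - findings may lack proper verification")
--     return loopholes
-- ===== Notes on version B (the rewrite author's own statement) =====
-- stated objective: alternative
-- what changed: Replaces A's six independent scans over citations (each lowercasing abstracts again) with one fold that maintains four boolean flags and a source set, followed by a separate reporting phase.
import Mathlib
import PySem

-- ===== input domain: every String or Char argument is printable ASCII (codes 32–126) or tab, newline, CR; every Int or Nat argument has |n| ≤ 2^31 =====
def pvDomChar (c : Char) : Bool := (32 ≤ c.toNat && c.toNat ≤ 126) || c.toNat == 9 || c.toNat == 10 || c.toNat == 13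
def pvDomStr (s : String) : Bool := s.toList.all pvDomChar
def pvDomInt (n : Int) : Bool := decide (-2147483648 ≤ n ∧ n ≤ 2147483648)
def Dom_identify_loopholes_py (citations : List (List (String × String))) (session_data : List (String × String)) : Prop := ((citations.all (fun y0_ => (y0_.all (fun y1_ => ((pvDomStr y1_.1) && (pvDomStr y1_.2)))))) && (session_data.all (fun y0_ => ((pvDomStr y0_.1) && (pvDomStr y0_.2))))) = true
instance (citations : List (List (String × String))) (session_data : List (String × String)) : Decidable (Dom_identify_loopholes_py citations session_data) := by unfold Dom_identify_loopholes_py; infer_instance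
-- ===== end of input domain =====

-- B replaces A's six independent scans over citations by one fold building flags and a source set; objective: alternative decomposition.

-- shared helper: c.get(k, d) on an association list (first match), exact
def pvGetD : List (String × String) → String → String → String
  | [], _, d => d
  | (k', v) :: rest, k, d => if k' == k then v else pvGetD rest k d

-- ===== PORT A =====
def identify_loopholes_py (citations : List (List (String × String))) (session_data : List (String × String)) : List String :=
  let loopholes : List String := []
  let loopholes := if citations.length < 3 then
    loopholes ++ ["Insufficient evidence base - conclusions may not be well-supported"] else loopholes
  let abstracts := citations.map (fun c => pvGetD c "abstract" "")
  let alternative_terms := ["however", "but", "although", "despite", "nevertheless", "alternative"]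
  let has_alternatives := abstracts.any (fun abstract =>
    alternative_terms.any (fun term => PySem.Str.isIn term (PySem.Str.lower abstract)))
  let loopholes := if !has_alternatives then
    loopholes ++ ["Limited consideration of alternative explanations or counterarguments"] else loopholes
  let sources := citations.map (fun c => pvGetD c "source" "")
  let loopholes := if PySem.Set.len (PySem.Set.ofList sources) == 1 then
    loopholes ++ ["Single-source bias - all research from same database may introduce bias"] else loopholes
  let loopholes := if !(citations.any (fun c =>
      PySem.Str.isIn "context" (PySem.Str.lower (pvGetD c "abstract" "")) ||
      PySem.Str.isIn "background" (PySem.Str.lower (pvGetD c "abstract" "")))) then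
    loopholes ++ ["Missing contextual information - research may lack proper background context"] else loopholes
  let loopholes := if !(citations.any (fun c =>
      PySem.Str.isIn "method" (PySem.Str.lower (pvGetD c "abstract" "")) ||
      PySem.Str.isIn "methodology" (PySem.Str.lower (pvGetD c "abstract" "")))) then
    loopholes ++ ["Limited methodological discussion - research approaches may not be well-justified"] else loopholes
  let loopholes := if !(citations.any (fun c =>
      PySem.Str.isIn "validate" (PySem.Str.lower (pvGetD c "abstract" "")) ||
      PySem.Str.isIn "verify" (PySem.Str.lower (pvGetD c "abstract" "")))) then
    loopholes ++ ["Missing validation approaches - findings may lack proper verification"] else loopholes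
  loopholes

-- ===== PORT B =====
-- single-pass state: (has_alt, has_ctx, has_meth, has_val, sources)
def pvAltTerms : List String := ["however", "but", "although", "despite", "nevertheless", "alternative"]

def pvStep (st : Bool × Bool × Bool × Bool × PySem.Set String) (c : List (String × String)) :
    Bool × Bool × Bool × Bool × PySem.Set String :=
  let a := PySem.Str.lower (pvGetD c "abstract" "")
  ( st.1 || pvAltTerms.any (fun t => PySem.Str.isIn t a),
    st.2.1 || PySem.Str.isIn "context" a || PySem.Str.isIn "background" a,
    st.2.2.1 || PySem.Str.isIn "method" a || PySem.Str.isIn "methodology" a,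
    st.2.2.2.1 || PySem.Str.isIn "validate" a || PySem.Str.isIn "verify" a,
    PySem.Set.add st.2.2.2.2 (pvGetD c "source" "") )

def identify_loopholes_py_alt (citations : List (List (String × String))) (session_data : List (String × String)) : List String :=
  let st := citations.foldl pvStep (false, false, false, false, PySem.Set.empty)
  (if citations.length < 3 then ["Insufficient evidence base - conclusions may not be well-supported"] else []) ++
  (if !st.1 then ["Limited consideration of alternative explanations or counterarguments"] else []) ++
  (if PySem.Set.len st.2.2.2.2 == 1 then ["Single-source bias - all research from same database may introduce bias"] else []) ++
  (if !st.2.1 then ["Missing contextual information - research may lack proper background context"] else []) ++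
  (if !st.2.2.1 then ["Limited methodological discussion - research approaches may not be well-justified"] else []) ++
  (if !st.2.2.2.1 then ["Missing validation approaches - findings may lack proper verification"] else [])

-- ===== PRECONDITION & SPEC =====
def Spec_identify_loopholes_py (citations : List (List (String × String))) (session_data : List (String × String)) (out : List String) : Prop := out = identify_loopholes_py_alt citations session_data
instance (citations : List (List (String × String))) (session_data : List (String × String)) (out : List String) : Decidable (Spec_identify_loopholes_py citations session_data out) := by unfold Spec_identify_loopholes_py; infer_instance

-- ===== CLAIM (what is proved, stated in full; the proofs are below) =====
def Claim_equal_identify_loopholes_py : Prop := ∀ (citations : List (List (String × String))) (session_data : List (String × String)), Dom_identify_loopholes_py citations session_data → Spec_identify_loopholes_py citations session_data (identify_loopholes_py citations session_data)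

-- ===== LEMMAS AND PROOFS =====

def pvAbs (c : List (String × String)) : String := PySem.Str.lower (pvGetD c "abstract" "")

lemma pvFold_eq (cs : List (List (String × String))) (st : Bool × Bool × Bool × Bool × PySem.Set String) :
    cs.foldl pvStep st =
      ( st.1 || cs.any (fun c => pvAltTerms.any (fun t => PySem.Str.isIn t (pvAbs c))),
        st.2.1 || cs.any (fun c => PySem.Str.isIn "context" (pvAbs c) || PySem.Str.isIn "background" (pvAbs c)),
        st.2.2.1 || cs.any (fun c => PySem.Str.isIn "method" (pvAbs c) || PySem.Str.isIn "methodology" (pvAbs c)),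
        st.2.2.2.1 || cs.any (fun c => PySem.Str.isIn "validate" (pvAbs c) || PySem.Str.isIn "verify" (pvAbs c)),
        cs.foldl (fun s c => PySem.Set.add s (pvGetD c "source" "")) st.2.2.2.2 ) := by
  induction cs generalizing st with
  | nil => simp
  | cons c rest ih =>
      simp only [List.foldl_cons, List.any_cons, ih, pvStep, pvAbs]
      simp [Bool.or_assoc]

-- ===== VERDICT (by name: the statement is the Claim_ definition above) =====
set_option maxHeartbeats 1000000 in
theorem identify_loopholes_py_spec : Claim_equal_identify_loopholes_py := by
  intro citations session_data _hdom
  show _ = _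
  unfold identify_loopholes_py identify_loopholes_py_alt
  rw [pvFold_eq]
  simp only [List.any_map, PySem.Set.ofList_eq_foldl, List.foldl_map, pvAbs, pvAltTerms,
    Bool.false_or, Function.comp_def, PySem.Set.empty]
  split_ifs <;> simp
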